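-- pv_equiv track=rewrite | github.com/laadiim/skola | python_skola/histogram/lists.py | get_value_counts
-- ===== SOURCE A (Python) =====
-- def get_value_counts(data):
--     values = {}
--     ordered = {}
--     for i in data:
--         if i in values.keys():
--             values[i] += 1
--         else:
--             values[i] = 1
--     myKeys = list(values.keys())
--     myKeys.sort()
--     ordered = {i: values[i] for i in myKeys}
--     return ordered
-- ===== SOURCE B (Python) =====
-- def get_value_counts(data):
--     s = sorted(data)
--     out = {}
--     i = 0
--     n = len(s)
--     while i < n:
--         x = s[i]
--         j = i + 1
--         while j < n and s[j] == x:
--             j += 1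
--         out[x] = j - i
--         i = j
--     return out
-- ===== Notes on version B (the rewrite author's own statement) =====
-- stated objective: alternative
-- what changed: B sorts the whole list first and counts runs of consecutive equal elements in one grouping pass, instead of counting into a dict and then sorting the distinct keys.
import Mathlib
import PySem

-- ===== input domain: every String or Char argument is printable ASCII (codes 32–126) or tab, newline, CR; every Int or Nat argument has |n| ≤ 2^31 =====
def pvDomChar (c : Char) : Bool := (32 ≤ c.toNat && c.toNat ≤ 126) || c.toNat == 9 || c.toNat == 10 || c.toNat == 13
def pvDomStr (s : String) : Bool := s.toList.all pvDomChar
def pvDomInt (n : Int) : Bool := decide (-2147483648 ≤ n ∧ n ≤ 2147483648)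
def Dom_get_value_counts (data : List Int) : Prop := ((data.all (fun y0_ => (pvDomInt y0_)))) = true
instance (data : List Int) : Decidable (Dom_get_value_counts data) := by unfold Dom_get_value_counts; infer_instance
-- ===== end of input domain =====

-- B replaces A's count-then-sort-keys algorithm by sort-everything-then-group-consecutive-runs; alternative algorithm, not claimed faster.

-- ===== PORT A =====
def get_value_counts (data : List Int) : List (Int × Int) :=
  let values := data.foldl
    (fun d i => if d.contains i then d.insert i (d.getD i 0 + 1) else d.insert i 1)
    PySem.Dict.empty
  let myKeys := PySem.List.sorted values.keys (fun x => x) false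
  let ordered := myKeys.foldl (fun d i => d.insert i (values.getD i 0)) PySem.Dict.empty
  ordered.items

-- ===== PORT B =====
-- the outer while loop of Source B: take one run of equal elements, emit (value, run length), continue after the run
def pvGroupRuns : List Int → List (Int × Int)
  | [] => []
  | x :: xs =>
      (x, ((xs.takeWhile (fun y => y == x)).length : Int) + 1) ::
        pvGroupRuns (xs.dropWhile (fun y => y == x))
termination_by l => l.length
decreasing_by simpa using Nat.lt_succ_of_le (List.length_dropWhile_le _ _)

def get_value_counts_alt (data : List Int) : List (Int × Int) :=
  pvGroupRuns (PySem.List.sorted data (fun x => x) false)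

-- ===== PRECONDITION & SPEC =====
def Spec_get_value_counts (data : List Int) (out : List (Int × Int)) : Prop := out = get_value_counts_alt data
instance (data : List Int) (out : List (Int × Int)) : Decidable (Spec_get_value_counts data out) := by unfold Spec_get_value_counts; infer_instance

-- ===== CLAIM (what is proved, stated in full; the proofs are below) =====
def Claim_equal_get_value_counts : Prop := ∀ (data : List Int), Dom_get_value_counts data → Spec_get_value_counts data (get_value_counts data)

-- ===== LEMMAS AND PROOFS =====

-- A's counting loop is collections.Counter: both branches insert (old count or 0) + 1
lemma pv_fold_eq_counter (data : List Int) :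
    data.foldl
      (fun d i => if d.contains i then d.insert i (d.getD i 0 + 1) else d.insert i 1)
      PySem.Dict.empty = PySem.Dict.counter data := by
  rw [← PySem.Dict.foldl_insert_getD_add_one_eq_counter]
  congr 1
  funext d i
  split_ifs with h
  · rfl
  · rw [PySem.Dict.getD_of_not_contains d 0 (by simpa using h)]
    norm_num

-- every element of a run equals the run's head
lemma pv_mem_takeWhile_eq {x y : Int} {xs : List Int}
    (h : y ∈ xs.takeWhile (fun z => z == x)) : y = x := by
  have := List.mem_takeWhile_imp h
  simpa using this

-- in a ≤-sorted list, everything after the head's run is strictly larger than the head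
lemma pv_lt_of_mem_dropWhile {x z : Int} {xs : List Int}
    (hs : (x :: xs).Pairwise (· ≤ ·))
    (hz : z ∈ xs.dropWhile (fun y => y == x)) : x < z := by
  have hsub : (xs.dropWhile (fun y => y == x)).Sublist xs := List.dropWhile_sublist _
  rcases hd : xs.dropWhile (fun y => y == x) with _ | ⟨y, d'⟩
  · simp [hd] at hz
  · have hy : ¬ (y == x) = true := by
      have := List.head_dropWhile_not (fun y => y == x) (l := xs) (by simp [hd])
      simpa [hd] using this
    have hyx : y ≠ x := by simpa using hy
    have hsub' : (y :: d').Sublist xs := hd ▸ hsub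
    have hpd : (y :: d').Pairwise (· ≤ ·) := (List.pairwise_cons.mp hs).2.sublist hsub'
    have hxy : x < y :=
      lt_of_le_of_ne ((List.pairwise_cons.mp hs).1 y (hsub'.mem (by simp))) (Ne.symm hyx)
    rw [hd] at hz
    rcases List.mem_cons.mp hz with rfl | hz'
    · exact hxy
    · exact lt_of_lt_of_le hxy ((List.pairwise_cons.mp hpd).1 z hz')

-- the first components of the groups are exactly the members of the list
lemma pv_mem_fst_groupRuns (l : List Int) (a : Int) :
    a ∈ (pvGroupRuns l).map Prod.fst ↔ a ∈ l := by
  induction l using pvGroupRuns.induct with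
  | case1 => simp [pvGroupRuns]
  | case2 x xs ih =>
    simp only [pvGroupRuns, List.map_cons, List.mem_cons, ih]
    constructor
    · rintro (rfl | h)
      · exact Or.inl rfl
      · exact Or.inr ((List.dropWhile_sublist _).mem h)
    · rintro (rfl | h)
      · exact Or.inl rfl
      · by_cases hx : a = x
        · exact Or.inl hx
        · right
          have hsp := List.takeWhile_append_dropWhile (p := fun y => y == x) (l := xs)
          rw [← hsp] at h
          rcases List.mem_append.mp h with h' | h'
          · exact absurd (pv_mem_takeWhile_eq h') hx
          · exact h'

-- on a ≤-sorted list the group heads are strictly increasing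
lemma pv_pairwise_fst_groupRuns (l : List Int) (hs : l.Pairwise (· ≤ ·)) :
    ((pvGroupRuns l).map Prod.fst).Pairwise (· < ·) := by
  induction l using pvGroupRuns.induct with
  | case1 => simp [pvGroupRuns]
  | case2 x xs ih =>
    have hd : (xs.dropWhile (fun y => y == x)).Pairwise (· ≤ ·) :=
      (List.pairwise_cons.mp hs).2.sublist (List.dropWhile_sublist _)
    simp only [pvGroupRuns, List.map_cons, List.pairwise_cons]
    refine ⟨fun a ha => ?_, ih hd⟩
    exact pv_lt_of_mem_dropWhile hs ((pv_mem_fst_groupRuns _ a).mp ha)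

-- on a ≤-sorted list each group is (its head, number of occurrences in the list)
lemma pv_groupRuns_eq_map_count (l : List Int) (hs : l.Pairwise (· ≤ ·)) :
    pvGroupRuns l = ((pvGroupRuns l).map Prod.fst).map (fun k => (k, (l.count k : Int))) := by
  induction l using pvGroupRuns.induct with
  | case1 => simp [pvGroupRuns]
  | case2 x xs ih =>
    have hsplit : xs = xs.takeWhile (fun y => y == x) ++ xs.dropWhile (fun y => y == x) :=
      (List.takeWhile_append_dropWhile).symm
    have hdpw : (xs.dropWhile (fun y => y == x)).Pairwise (· ≤ ·) :=
      (List.pairwise_cons.mp hs).2.sublist (List.dropWhile_sublist _)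
    have hxd : x ∉ xs.dropWhile (fun y => y == x) :=
      fun h => lt_irrefl x (pv_lt_of_mem_dropWhile hs h)
    have hcx : (x :: xs).count x = (xs.takeWhile (fun y => y == x)).length + 1 := by
      have htc : (xs.takeWhile (fun y => y == x)).count x = (xs.takeWhile (fun y => y == x)).length :=
        List.count_eq_length.mpr (fun y hy => by simpa using (pv_mem_takeWhile_eq hy).symm)
      have hdc : (xs.dropWhile (fun y => y == x)).count x = 0 := List.count_eq_zero.mpr hxd
      rw [List.count_cons_self]
      conv_lhs => rw [hsplit]
      rw [List.count_append, htc, hdc]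
    have hcz : ∀ z ∈ xs.dropWhile (fun y => y == x),
        (x :: xs).count z = (xs.dropWhile (fun y => y == x)).count z := by
      intro z hz
      have hzx : z ≠ x := ne_of_gt (pv_lt_of_mem_dropWhile hs hz)
      have htz : (xs.takeWhile (fun y => y == x)).count z = 0 :=
        List.count_eq_zero.mpr (fun h => hzx (pv_mem_takeWhile_eq h))
      have hxsc : List.count z xs = List.count z (List.dropWhile (fun y => y == x) xs) := by
        conv_lhs => rw [hsplit]
        rw [List.count_append, htz, Nat.zero_add]
      rw [List.count_cons, hxsc]
      simp [Ne.symm hzx]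
    simp only [pvGroupRuns, List.map_cons]
    congr 1
    · rw [hcx]; push_cast; ring_nf
    · conv_lhs => rw [ih hdpw]
      refine List.map_congr_left (fun k hk => ?_)
      rw [hcz k ((pv_mem_fst_groupRuns _ k).mp hk)]

-- A's result in closed form: sorted distinct values, each with its count
lemma pv_A_closed (data : List Int) :
    get_value_counts data =
      (PySem.List.sorted (PySem.Set.ofList data) (fun x => x) false).map
        (fun k => (k, ((data.count k : Int)))) := by
  unfold get_value_counts
  dsimp only
  rw [pv_fold_eq_counter, PySem.Dict.keys_counter]
  have hnd : (PySem.List.sorted (PySem.Set.ofList data) (fun x => x) false).Nodup :=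
    (PySem.List.sorted_perm _ _ _).nodup_iff.mpr (PySem.Set.nodup_ofList data)
  rw [PySem.Dict.items_foldl_insert_fresh _ (fun i => i) _ _
      (fun a _ => PySem.Dict.contains_empty a) (by simpa using hnd)]
  have hie : (PySem.Dict.empty : PySem.Dict Int Int).items = [] := rfl
  rw [hie, List.nil_append]
  exact List.map_congr_left (fun k _ => by rw [PySem.Dict.getD_counter])

theorem pv_main (data : List Int) : get_value_counts data = get_value_counts_alt data := by
  have hperm : (PySem.List.sorted data (fun x => x) false).Perm data := PySem.List.sorted_perm _ _ _
  have hspw : (PySem.List.sorted data (fun x => x) false).Pairwise (· ≤ ·) := by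
    simpa using PySem.List.sorted_pairwise (xs := data) (key := fun x => x)
  have hndfst : ((pvGroupRuns (PySem.List.sorted data (fun x => x) false)).map Prod.fst).Nodup :=
    (pv_pairwise_fst_groupRuns _ hspw).nodup
  have hpermfst : ((pvGroupRuns (PySem.List.sorted data (fun x => x) false)).map Prod.fst).Perm
      (PySem.Set.ofList data) := by
    rw [List.perm_ext_iff_of_nodup hndfst (PySem.Set.nodup_ofList data)]
    intro a
    rw [pv_mem_fst_groupRuns, PySem.Set.mem_ofList, hperm.mem_iff]
  have hsorted : PySem.List.sorted (PySem.Set.ofList data) (fun x => x) false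
      = (pvGroupRuns (PySem.List.sorted data (fun x => x) false)).map Prod.fst :=
    PySem.List.sorted_eq_of_perm_of_pairwise_lt _ _ _ hpermfst
      (pv_pairwise_fst_groupRuns _ hspw)
  rw [pv_A_closed, hsorted, get_value_counts_alt]
  conv_rhs => rw [pv_groupRuns_eq_map_count _ hspw]
  refine List.map_congr_left (fun k _ => ?_)
  rw [hperm.count_eq]

-- ===== VERDICT (by name: the statement is the Claim_ definition above) =====
theorem get_value_counts_spec : Claim_equal_get_value_counts := by
  intro data _
  unfold Spec_get_value_counts
  exact pv_main data
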